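-- pv_equiv track=rewrite | github.com/w-s-bitcoin/webapps-quantum-exposure | webapps/quantum_exposure/pipeline/summarize_snapshot_diff.py | total_issued_supply_sats_at_height
-- ===== SOURCE A (Python) =====
-- SATS_PER_BTC = 100_000_000
--
-- def total_issued_supply_sats_at_height(height: int) -> int:
--     """Return cumulative mined BTC supply in sats at a given block height."""
--     if height <= 0:
--         return 0
--
--     remaining_blocks = int(height)
--     era = 0
--     total_sats = 0
--
--     while remaining_blocks > 0:
--         subsidy_sats = 50 * SATS_PER_BTC // (2**era)
--         if subsidy_sats <= 0:
--             break
--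
--         blocks_in_era = min(210_000, remaining_blocks)
--         total_sats += blocks_in_era * subsidy_sats
--         remaining_blocks -= blocks_in_era
--         era += 1
--
--     return total_sats
-- ===== SOURCE B (Python) =====
-- SATS_PER_BTC = 100_000_000
--
-- def total_issued_supply_sats_at_height(height: int) -> int:
--     """Closed form: sum_{e>=0} floor(S / 2**e) == 2*S - popcount(S), so the
--     whole-era part is a difference of two such expressions -- no loop at all."""
--     if height <= 0:
--         return 0
--     q, r = divmod(int(height), 210_000)
--     s = 50 * SATS_PER_BTC
--     t = s >> q
--     full_eras_per_block = (2 * s - s.bit_count()) - (2 * t - t.bit_count())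
--     return 210_000 * full_eras_per_block + r * t
-- ===== Notes on version B (the rewrite author's own statement) =====
-- stated objective: alternative
-- what changed: B replaces A's era-by-era while loop with a loop-free closed form: the identity that summing floor(S/2^e) over all e equals twice S minus popcount(S) gives the per-block subsidy total over all full eras as a difference of two popcount expressions, plus one remainder term for the partial era.
import Mathlib
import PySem

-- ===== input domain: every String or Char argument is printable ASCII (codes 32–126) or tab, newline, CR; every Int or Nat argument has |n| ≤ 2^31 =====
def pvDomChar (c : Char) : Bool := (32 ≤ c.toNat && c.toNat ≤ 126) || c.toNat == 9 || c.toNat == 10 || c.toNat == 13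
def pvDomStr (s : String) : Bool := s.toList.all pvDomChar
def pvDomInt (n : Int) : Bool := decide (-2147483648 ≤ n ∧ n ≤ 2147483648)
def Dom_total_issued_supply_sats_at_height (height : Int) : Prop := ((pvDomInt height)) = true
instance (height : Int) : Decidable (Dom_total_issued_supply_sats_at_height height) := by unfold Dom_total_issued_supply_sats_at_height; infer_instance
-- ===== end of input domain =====

-- B replaces A's era loop with a loop-free popcount closed form (sum of halvings = 2S - popcount S).

-- ===== PORT A =====
-- subsidy at a given era: 50 * SATS_PER_BTC // 2**era
def pvSubsidy (era : Nat) : Int := PySem.Int.floordiv (50 * 100000000) (2 ^ era)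

-- A's while loop; remaining_blocks is positive throughout, carried as a Nat
def pvAloop (r era : Nat) (total : Int) : Int :=
  if r = 0 then total
  else
    let s := pvSubsidy era
    if s ≤ 0 then total
    else
      let b := min 210000 r
      pvAloop (r - b) (era + 1) (total + (b : Int) * s)
termination_by r
decreasing_by omega

def total_issued_supply_sats_at_height (height : Int) : Int :=
  if height ≤ 0 then 0 else pvAloop height.toNat 0 0

-- ===== PORT B =====
-- int.bit_count(): number of set bits
def pvPopcount (n : Nat) : Nat :=
  if n = 0 then 0 else n % 2 + pvPopcount (n / 2)
termination_by n
decreasing_by omega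

def total_issued_supply_sats_at_height_alt (height : Int) : Int :=
  if height ≤ 0 then 0
  else
    -- divmod(int(height), 210_000) with height > 0: Nat division is exact here
    let q := height.toNat / 210000
    let r := height.toNat % 210000
    let s : Nat := 5000000000          -- 50 * SATS_PER_BTC
    let t : Nat := s / 2 ^ q           -- s >> q (Python's shift = floor division by 2^q)
    210000 * ((2 * (s : Int) - (pvPopcount s : Int)) - (2 * (t : Int) - (pvPopcount t : Int)))
      + (r : Int) * (t : Int)

-- ===== PRECONDITION & SPEC =====
def Spec_total_issued_supply_sats_at_height (height : Int) (out : Int) : Prop := out = total_issued_supply_sats_at_height_alt height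
instance (height : Int) (out : Int) : Decidable (Spec_total_issued_supply_sats_at_height height out) := by unfold Spec_total_issued_supply_sats_at_height; infer_instance

-- ===== CLAIM =====
def Claim_equal_total_issued_supply_sats_at_height : Prop := ∀ (height : Int), Dom_total_issued_supply_sats_at_height height → Spec_total_issued_supply_sats_at_height height (total_issued_supply_sats_at_height height)

-- ===== LEMMAS AND PROOFS =====

-- g y = 2y - popcount y, the value of the infinite sum Σ_{e≥0} ⌊y/2^e⌋
def pvG (y : Nat) : Int := 2 * (y : Int) - (pvPopcount y : Int)

lemma pvPopcount_step (y : Nat) : pvPopcount y = y % 2 + pvPopcount (y / 2) := by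
  by_cases h : y = 0
  · subst h; simp [pvPopcount]
  · rw [pvPopcount]; simp [h]

lemma pvG_step (y : Nat) : pvG y - pvG (y / 2) = (y : Int) := by
  unfold pvG
  rw [pvPopcount_step y]
  have := Nat.div_add_mod y 2
  push_cast
  omega

lemma pvSubsidy_eq_natCast (era : Nat) : pvSubsidy era = ((5000000000 / 2 ^ era : Nat) : Int) := by
  have h := PySem.Int.floordiv_natCast 5000000000 (2 ^ era)
  simpa [pvSubsidy] using h

lemma pvSubsidy_nonneg (era : Nat) : 0 ≤ pvSubsidy era := by
  rw [pvSubsidy_eq_natCast]; exact Int.natCast_nonneg _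

lemma pvSubsidy_zero_mono {era k : Nat} (h : pvSubsidy era = 0) : pvSubsidy (era + k) = 0 := by
  rw [pvSubsidy_eq_natCast] at h ⊢
  have h0 : (5000000000 : Nat) / 2 ^ era = 0 := by exact_mod_cast h
  have hlt : (5000000000 : Nat) < 2 ^ era := Nat.lt_of_div_eq_zero (by positivity) h0
  have : (5000000000 : Nat) < 2 ^ (era + k) :=
    lt_of_lt_of_le hlt (Nat.pow_le_pow_right (by norm_num) (Nat.le_add_right _ _))
  simp [Nat.div_eq_of_lt this]

-- proof-side abstraction of the whole-era part of A's loop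
def pvBloop : Nat → Nat → Int → Int
  | 0, _, total => total
  | (k+1), era, total =>
    let s := pvSubsidy era
    if s = 0 then total
    else pvBloop k (era+1) (total + 210000 * s)

lemma pvBloop_acc (k : Nat) : ∀ era total, pvBloop k era total = total + pvBloop k era 0 := by
  induction k with
  | zero => intro era total; simp [pvBloop]
  | succ k ih =>
    intro era total
    simp only [pvBloop]
    split
    · simp
    · rw [ih, ih (era + 1) (0 + 210000 * pvSubsidy era)]; ring

-- A's loop = whole-era part + partial-era term
lemma pvKey (n : Nat) : ∀ era total,
    pvAloop n era total =
      total + pvBloop (n / 210000) era 0 + ((n % 210000 : Nat) : Int) * pvSubsidy (era + n / 210000) := by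
  induction n using Nat.strong_induction_on with
  | _ n ih =>
    intro era total
    rw [pvAloop]
    by_cases hn : n = 0
    · subst hn; simp [pvBloop]
    · simp only [hn, if_false]
      by_cases hz : pvSubsidy era ≤ 0
      · have h0 : pvSubsidy era = 0 := le_antisymm hz (pvSubsidy_nonneg era)
        have hq : pvSubsidy (era + n / 210000) = 0 := pvSubsidy_zero_mono h0
        simp only [hz, if_true]
        rcases Nat.eq_zero_or_pos (n / 210000) with hq0 | hqp
        · have h0' : pvSubsidy era = 0 := by rw [hq0] at hq; simpa using hq
          simp [hq0, pvBloop, h0']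
        · obtain ⟨k, hk⟩ : ∃ k, n / 210000 = k + 1 := ⟨n / 210000 - 1, by omega⟩
          rw [hk]
          simp [pvBloop, h0, hk ▸ hq]
      · simp only [hz, if_false]
        push_neg at hz
        by_cases hsmall : n < 210000
        · have hb : min 210000 n = n := by omega
          have hq0 : n / 210000 = 0 := by omega
          have hm : n % 210000 = n := by omega
          rw [hb]
          simp only [Nat.sub_self]
          rw [pvAloop]
          simp [hq0, hm, pvBloop]
        · have hb : min 210000 n = 210000 := by omega
          rw [hb]
          have hlt : n - 210000 < n := by omega
          rw [ih _ hlt]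
          have hq : (n - 210000) / 210000 = n / 210000 - 1 := by omega
          have hm : (n - 210000) % 210000 = n % 210000 := by omega
          obtain ⟨k, hk⟩ : ∃ k, n / 210000 = k + 1 := ⟨n / 210000 - 1, by omega⟩
          rw [hq, hm, hk]
          simp only [Nat.add_sub_cancel]
          have hbl : pvBloop (k+1) era 0 = 210000 * pvSubsidy era + pvBloop k (era+1) 0 := by
            have hne : pvSubsidy era ≠ 0 := by omega
            simp only [pvBloop, hne, if_false]
            rw [pvBloop_acc]; ring
          rw [hbl]
          have hsh : era + 1 + k = era + (k + 1) := by omega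
          rw [hsh]; push_cast; ring

-- the whole-era part equals the popcount closed form
lemma pvBloop_closed (q : Nat) : ∀ era,
    pvBloop q era 0 = 210000 * (pvG (5000000000 / 2 ^ era) - pvG (5000000000 / 2 ^ (era + q))) := by
  induction q with
  | zero => intro era; simp [pvBloop]
  | succ q ih =>
    intro era
    simp only [pvBloop]
    by_cases h0 : pvSubsidy era = 0
    · have hera : (5000000000 : Nat) / 2 ^ era = 0 := by
        have := pvSubsidy_eq_natCast era; rw [h0] at this; exact_mod_cast this.symm
      have hnext : (5000000000 : Nat) / 2 ^ (era + (q+1)) = 0 := by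
        have := pvSubsidy_zero_mono (k := q+1) h0
        rw [pvSubsidy_eq_natCast] at this; exact_mod_cast this
      simp [h0, hera, hnext]
    · simp only [h0, if_false]
      rw [pvBloop_acc, ih (era + 1)]
      have hdiv : (5000000000 : Nat) / 2 ^ (era + 1) = (5000000000 / 2 ^ era) / 2 := by
        rw [pow_succ, Nat.div_div_eq_div_mul]
      have hsub : pvSubsidy era = ((5000000000 / 2 ^ era : Nat) : Int) := pvSubsidy_eq_natCast era
      have hg := pvG_step (5000000000 / 2 ^ era)
      have hsh : era + 1 + q = era + (q + 1) := by omega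
      rw [hdiv, hsh] at *
      rw [hsub]
      omega

-- ===== VERDICT =====
theorem total_issued_supply_sats_at_height_spec : Claim_equal_total_issued_supply_sats_at_height := by
  intro height _
  unfold Spec_total_issued_supply_sats_at_height
  unfold total_issued_supply_sats_at_height total_issued_supply_sats_at_height_alt
  by_cases h : height ≤ 0
  · simp [h]
  · simp only [h, if_false]
    rw [pvKey, pvBloop_closed, pvSubsidy_eq_natCast]
    simp [pvG]
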